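-- pv_equiv track=rewrite | github.com/kubeopt/kubeopt | machine_learning/models/dna_analyzer.py | _calculate_cluster_maturity_from_config
-- ===== SOURCE A (Python) =====
-- from typing import Any, Dict, List, Optional, Tuple
--
-- def _calculate_cluster_maturity_from_config(workload_patterns: Dict,
--                                           scaling_behavior: Dict,
--                                           namespace_distribution: Dict) -> str:
--     """Calculate cluster maturity based on real configuration"""
--
--     maturity_score = 0
--
--     # Workload diversity
--     workload_types = sum(1 for count in workload_patterns.values() if count > 0)
--     if workload_types >= 3:
--         maturity_score += 2
--     elif workload_types >= 2:
--         maturity_score += 1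
--
--     # Scaling adoption
--     if scaling_behavior.get('hpa_coverage', 0) > 50:
--         maturity_score += 2
--     elif scaling_behavior.get('hpa_coverage', 0) > 20:
--         maturity_score += 1
--
--     # Namespace organization
--     app_namespaces = namespace_distribution.get('app_namespaces', 0)
--     if app_namespaces > 5:
--         maturity_score += 2
--     elif app_namespaces > 2:
--         maturity_score += 1
--
--     # Total workload scale
--     total_workloads = workload_patterns.get('total_workloads', 0)
--     if total_workloads > 20:
--         maturity_score += 1
--
--     # Determine maturity level
--     if maturity_score >= 6:
--         return 'enterprise'
--     elif maturity_score >= 4: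
--         return 'mature'
--     elif maturity_score >= 2:
--         return 'developing'
--     else:
--         return 'basic'
-- ===== SOURCE B (Python) =====
-- def _calculate_cluster_maturity_from_config(workload_patterns, scaling_behavior, namespace_distribution):
--     """Maturity = how many of a flat list of (value, threshold) checks the cluster clears.
--
--     Every '+= 2 / += 1' chain in the original is equivalent to one point per strict
--     threshold crossed, so the whole score is a single count over seven checks, and the
--     final label is likewise a count of score cut-offs cleared.
--     """
--     workload_types = sum(1 for count in workload_patterns.values() if count > 0)
--     checks = [
--         (workload_types, 1),                               # workload diversity: >1 (i.e. >=2)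
--         (workload_types, 2),                               # and >2 (i.e. >=3)
--         (scaling_behavior.get('hpa_coverage', 0), 20),     # scaling adoption
--         (scaling_behavior.get('hpa_coverage', 0), 50),
--         (namespace_distribution.get('app_namespaces', 0), 2),  # namespace organization
--         (namespace_distribution.get('app_namespaces', 0), 5),
--         (workload_patterns.get('total_workloads', 0), 20), # total scale
--     ]
--     score = sum(value > threshold for value, threshold in checks)
--     levels = ['basic', 'developing', 'mature', 'enterprise']
--     return levels[sum(score >= cut for cut in (2, 4, 6))]
-- ===== Notes on version B (the rewrite author's own statement) =====
-- stated objective: alternative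
-- what changed: Instead of four staged if/elif chains accumulating a score, B builds one flat list of seven (value, threshold) checks, counts the strict crossings in a single pass, and picks the label by counting score cut-offs cleared (no branching at all).
import Mathlib
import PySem

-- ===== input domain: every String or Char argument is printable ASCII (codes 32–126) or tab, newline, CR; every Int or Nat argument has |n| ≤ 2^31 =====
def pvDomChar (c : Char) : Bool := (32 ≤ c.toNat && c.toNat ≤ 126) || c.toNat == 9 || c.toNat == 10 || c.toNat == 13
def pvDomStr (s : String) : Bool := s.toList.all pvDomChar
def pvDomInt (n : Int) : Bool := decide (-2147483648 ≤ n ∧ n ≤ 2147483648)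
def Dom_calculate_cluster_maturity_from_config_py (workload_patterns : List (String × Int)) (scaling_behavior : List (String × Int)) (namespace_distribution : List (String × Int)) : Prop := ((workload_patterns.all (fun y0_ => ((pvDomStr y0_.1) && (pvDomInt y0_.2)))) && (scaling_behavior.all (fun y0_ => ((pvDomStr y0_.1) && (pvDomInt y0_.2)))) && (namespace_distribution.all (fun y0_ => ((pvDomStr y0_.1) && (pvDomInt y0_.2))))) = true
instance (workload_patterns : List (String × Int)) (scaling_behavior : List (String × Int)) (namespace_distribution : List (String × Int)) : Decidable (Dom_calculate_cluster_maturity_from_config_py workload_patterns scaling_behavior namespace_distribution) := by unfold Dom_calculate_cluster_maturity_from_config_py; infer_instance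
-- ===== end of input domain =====

-- B replaces the staged if/elif score chains by one flat count of (value, threshold) crossings
-- and a count of score cut-offs cleared (alternative, branch-free decomposition; same cost).

-- ===== PORT A =====
-- literal transliteration of _calculate_cluster_maturity_from_config (dicts built with
-- PySem.Dict.ofList, matching dict(pairs); sum(1 for v in values if v > 0) is List.countP)
def calculate_cluster_maturity_from_config_py (workload_patterns : List (String × Int)) (scaling_behavior : List (String × Int)) (namespace_distribution : List (String × Int)) : String :=
  let wp := PySem.Dict.ofList workload_patterns
  let sb := PySem.Dict.ofList scaling_behavior
  let nd := PySem.Dict.ofList namespace_distribution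
  let maturity_score : Int := 0
  let workload_types : Int := (wp.values.countP (fun count => 0 < count) : Nat)
  let maturity_score :=
    if workload_types ≥ 3 then maturity_score + 2
    else if workload_types ≥ 2 then maturity_score + 1
    else maturity_score
  let maturity_score :=
    if sb.getD "hpa_coverage" 0 > 50 then maturity_score + 2
    else if sb.getD "hpa_coverage" 0 > 20 then maturity_score + 1
    else maturity_score
  let app_namespaces := nd.getD "app_namespaces" 0
  let maturity_score :=
    if app_namespaces > 5 then maturity_score + 2
    else if app_namespaces > 2 then maturity_score + 1
    else maturity_score
  let total_workloads := wp.getD "total_workloads" 0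
  let maturity_score :=
    if total_workloads > 20 then maturity_score + 1
    else maturity_score
  if maturity_score ≥ 6 then "enterprise"
  else if maturity_score ≥ 4 then "mature"
  else if maturity_score ≥ 2 then "developing"
  else "basic"

-- ===== PORT B =====
-- literal transliteration of Source B: the flat checks list, sum(value > threshold …) as countP,
-- sum(score >= cut …) as countP; the list index is always in range (≤ 3), so Python's [] is
-- pyGet? with .getD "" as a total wrapper — the none case is unreachable.
def calculate_cluster_maturity_from_config_py_alt (workload_patterns : List (String × Int)) (scaling_behavior : List (String × Int)) (namespace_distribution : List (String × Int)) : String :=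
  let wp := PySem.Dict.ofList workload_patterns
  let sb := PySem.Dict.ofList scaling_behavior
  let nd := PySem.Dict.ofList namespace_distribution
  let workload_types : Int := (wp.values.countP (fun count => 0 < count) : Nat)
  let checks : List (Int × Int) :=
    [(workload_types, 1), (workload_types, 2),
     (sb.getD "hpa_coverage" 0, 20), (sb.getD "hpa_coverage" 0, 50),
     (nd.getD "app_namespaces" 0, 2), (nd.getD "app_namespaces" 0, 5),
     (wp.getD "total_workloads" 0, 20)]
  let score : Int := (checks.countP (fun p => p.2 < p.1) : Nat)
  let levels : List String := ["basic", "developing", "mature", "enterprise"]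
  (PySem.List.pyGet? levels
    (([(2 : Int), 4, 6].countP (fun cut => cut ≤ score) : Nat) : Int)).getD ""

-- ===== PRECONDITION & SPEC =====
def Spec_calculate_cluster_maturity_from_config_py (workload_patterns : List (String × Int)) (scaling_behavior : List (String × Int)) (namespace_distribution : List (String × Int)) (out : String) : Prop := out = calculate_cluster_maturity_from_config_py_alt workload_patterns scaling_behavior namespace_distribution
instance (workload_patterns : List (String × Int)) (scaling_behavior : List (String × Int)) (namespace_distribution : List (String × Int)) (out : String) : Decidable (Spec_calculate_cluster_maturity_from_config_py workload_patterns scaling_behavior namespace_distribution out) := by unfold Spec_calculate_cluster_maturity_from_config_py; infer_instance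

-- ===== CLAIM (what is proved, stated in full; the proofs are below) =====
def Claim_equal_calculate_cluster_maturity_from_config_py : Prop := ∀ (workload_patterns : List (String × Int)) (scaling_behavior : List (String × Int)) (namespace_distribution : List (String × Int)), Dom_calculate_cluster_maturity_from_config_py workload_patterns scaling_behavior namespace_distribution → Spec_calculate_cluster_maturity_from_config_py workload_patterns scaling_behavior namespace_distribution (calculate_cluster_maturity_from_config_py workload_patterns scaling_behavior namespace_distribution)

-- ===== LEMMAS AND PROOFS =====

-- the staged if/elif accumulation equals the flat count of strict threshold crossings
lemma score_eq (w h a t : Int) :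
    (if t > 20 then
       (if a > 5 then (if h > 50 then (if w ≥ 3 then (0 : Int) + 2 else if w ≥ 2 then (0 : Int) + 1 else 0) + 2
                        else if h > 20 then (if w ≥ 3 then (0 : Int) + 2 else if w ≥ 2 then (0 : Int) + 1 else 0) + 1
                        else (if w ≥ 3 then (0 : Int) + 2 else if w ≥ 2 then (0 : Int) + 1 else 0)) + 2
        else if a > 2 then (if h > 50 then (if w ≥ 3 then (0 : Int) + 2 else if w ≥ 2 then (0 : Int) + 1 else 0) + 2
                        else if h > 20 then (if w ≥ 3 then (0 : Int) + 2 else if w ≥ 2 then (0 : Int) + 1 else 0) + 1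
                        else (if w ≥ 3 then (0 : Int) + 2 else if w ≥ 2 then (0 : Int) + 1 else 0)) + 1
        else (if h > 50 then (if w ≥ 3 then (0 : Int) + 2 else if w ≥ 2 then (0 : Int) + 1 else 0) + 2
                        else if h > 20 then (if w ≥ 3 then (0 : Int) + 2 else if w ≥ 2 then (0 : Int) + 1 else 0) + 1
                        else (if w ≥ 3 then (0 : Int) + 2 else if w ≥ 2 then (0 : Int) + 1 else 0))) + 1
     else
       (if a > 5 then (if h > 50 then (if w ≥ 3 then (0 : Int) + 2 else if w ≥ 2 then (0 : Int) + 1 else 0) + 2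
                        else if h > 20 then (if w ≥ 3 then (0 : Int) + 2 else if w ≥ 2 then (0 : Int) + 1 else 0) + 1
                        else (if w ≥ 3 then (0 : Int) + 2 else if w ≥ 2 then (0 : Int) + 1 else 0)) + 2
        else if a > 2 then (if h > 50 then (if w ≥ 3 then (0 : Int) + 2 else if w ≥ 2 then (0 : Int) + 1 else 0) + 2
                        else if h > 20 then (if w ≥ 3 then (0 : Int) + 2 else if w ≥ 2 then (0 : Int) + 1 else 0) + 1
                        else (if w ≥ 3 then (0 : Int) + 2 else if w ≥ 2 then (0 : Int) + 1 else 0)) + 1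
        else (if h > 50 then (if w ≥ 3 then (0 : Int) + 2 else if w ≥ 2 then (0 : Int) + 1 else 0) + 2
                        else if h > 20 then (if w ≥ 3 then (0 : Int) + 2 else if w ≥ 2 then (0 : Int) + 1 else 0) + 1
                        else (if w ≥ 3 then (0 : Int) + 2 else if w ≥ 2 then (0 : Int) + 1 else 0))))
    = ((([(w, (1 : Int)), (w, 2), (h, 20), (h, 50), (a, 2), (a, 5), (t, 20)].countP
          (fun p => p.2 < p.1) : Nat) : Int)) := by
  simp only [List.countP_cons, List.countP_nil, decide_eq_true_eq]
  push_cast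
  split_ifs <;> omega

-- the final if/elif label chain equals indexing the level table by the count of cut-offs cleared
lemma label_idx (s : Int) :
    (if s ≥ 6 then "enterprise" else if s ≥ 4 then "mature"
     else if s ≥ 2 then "developing" else "basic")
    = (PySem.List.pyGet? ["basic", "developing", "mature", "enterprise"]
        ((([(2 : Int), 4, 6].countP (fun cut => cut ≤ s) : Nat) : Int))).getD "" := by
  simp only [List.countP_cons, List.countP_nil, decide_eq_true_eq]
  split_ifs <;> first | rfl | omega

-- the two lemmas combined: the whole of A equals the whole of B, criterion values abstracted
lemma label_eq (w h a t : Int) :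
    (let s1 := if w ≥ 3 then (0 : Int) + 2 else if w ≥ 2 then (0 : Int) + 1 else (0 : Int)
     let s2 := if h > 50 then s1 + 2 else if h > 20 then s1 + 1 else s1
     let s3 := if a > 5 then s2 + 2 else if a > 2 then s2 + 1 else s2
     let s4 := if t > 20 then s3 + 1 else s3
     if s4 ≥ 6 then "enterprise" else if s4 ≥ 4 then "mature"
     else if s4 ≥ 2 then "developing" else "basic")
    = (PySem.List.pyGet? ["basic", "developing", "mature", "enterprise"]
        ((([(2 : Int), 4, 6].countP (fun cut => cut ≤
            (([(w, (1 : Int)), (w, 2), (h, 20), (h, 50), (a, 2), (a, 5), (t, 20)].countP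
               (fun p => p.2 < p.1) : Nat) : Int))) : Nat) : Int)).getD "" := by
  simp only []
  rw [label_idx, score_eq]

-- ===== VERDICT (by name: the statement is the Claim_ definition above) =====
theorem calculate_cluster_maturity_from_config_py_spec : Claim_equal_calculate_cluster_maturity_from_config_py := by
  intro wp sb nd _
  unfold Spec_calculate_cluster_maturity_from_config_py
  unfold calculate_cluster_maturity_from_config_py calculate_cluster_maturity_from_config_py_alt
  exact label_eq _ _ _ _
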